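-- pv_equiv track=rewrite | github.com/wzygxr/shuati | class048_MaximumSubarray_HouseRobber/Code06_MaximumSubmatrix.py | kadane_with_position
-- ===== SOURCE A (Python) =====
-- from typing import List
--
-- def kadane_with_position(arr: List[int]) -> tuple:
--     """
--     Kadane算法扩展：返回最大子数组和及其位置
--
--     Args:
--         arr: 输入的一维整数数组
--
--     Returns:
--         tuple: (最大和, 左边界, 右边界)
--     """
--     if not arr:
--         return 0, 0, 0
--
--     max_sum = arr[0]
--     current_sum = arr[0]
--     max_left, max_right = 0, 0
--     current_left = 0
--
--     for i in range(1, len(arr)):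
--         if arr[i] > current_sum + arr[i]:
--             current_sum = arr[i]
--             current_left = i
--         else:
--             current_sum += arr[i]
--
--         if current_sum > max_sum:
--             max_sum = current_sum
--             max_left = current_left
--             max_right = i
--
--     return max_sum, max_left, max_right
-- ===== SOURCE B (Python) =====
-- from typing import List
--
-- def kadane_with_position(arr: List[int]) -> tuple:
--     """Prefix-sum formulation: max subarray sum = cumulative sum minus the
--     smallest (earliest) prefix sum seen before the current element."""
--     if not arr:
--         return 0, 0, 0
--     cum = 0
--     min_prefix, min_index = 0, 0
--     best, best_l, best_r = arr[0], 0, 0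
--     for i, x in enumerate(arr):
--         if cum < min_prefix:
--             min_prefix, min_index = cum, i
--         cum += x
--         cand = cum - min_prefix
--         if cand > best:
--             best, best_l, best_r = cand, min_index, i
--     return best, best_l, best_r
-- ===== Notes on version B (the rewrite author's own statement) =====
-- stated objective: alternative
-- what changed: Replaces Kadane's running best-suffix recurrence (reset current_sum/current_left when extending hurts) with a prefix-sum scan that maintains the cumulative sum and the earliest minimum prefix, taking cum - min_prefix as the candidate at each index.
import Mathlib
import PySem

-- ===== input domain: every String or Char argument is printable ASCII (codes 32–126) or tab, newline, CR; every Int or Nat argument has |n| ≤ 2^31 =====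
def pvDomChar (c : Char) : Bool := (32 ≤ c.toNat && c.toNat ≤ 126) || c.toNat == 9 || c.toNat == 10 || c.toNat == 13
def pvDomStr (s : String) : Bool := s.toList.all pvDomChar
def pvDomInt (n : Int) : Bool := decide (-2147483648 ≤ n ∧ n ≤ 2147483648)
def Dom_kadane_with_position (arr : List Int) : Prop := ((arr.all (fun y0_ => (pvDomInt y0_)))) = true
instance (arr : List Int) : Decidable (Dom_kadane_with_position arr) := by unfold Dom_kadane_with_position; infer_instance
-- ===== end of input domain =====

-- B replaces Kadane's reset-based suffix recurrence with a cumulative-sum /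
-- earliest-min-prefix scan (alternative decomposition, same O(n) cost).

-- ===== PORT A =====
-- loop 'for i in range(1, len(arr))' ported as recursion over the tail with index i
def kadaneLoopA (ms cs ml mr cl i : Int) : List Int → Int × Int × Int
  | [] => (ms, ml, mr)
  | x :: rest =>
    let cs' := if x > cs + x then x else cs + x
    let cl' := if x > cs + x then i else cl
    if cs' > ms then kadaneLoopA cs' cs' cl' i cl' (i + 1) rest
    else kadaneLoopA ms cs' ml mr cl' (i + 1) rest

def kadane_with_position (arr : List Int) : Int × Int × Int :=
  match arr with
  | [] => (0, 0, 0)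
  | a :: rest => kadaneLoopA a a 0 0 0 1 rest

-- ===== PORT B =====
-- loop 'for i, x in enumerate(arr)' ported as recursion over the list with index i
def kadaneLoopB (cum mp mi bs bl br i : Int) : List Int → Int × Int × Int
  | [] => (bs, bl, br)
  | x :: rest =>
    let mp' := if cum < mp then cum else mp
    let mi' := if cum < mp then i else mi
    let cum' := cum + x
    let cand := cum' - mp'
    if cand > bs then kadaneLoopB cum' mp' mi' cand mi' i (i + 1) rest
    else kadaneLoopB cum' mp' mi' bs bl br (i + 1) rest

def kadane_with_position_alt (arr : List Int) : Int × Int × Int :=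
  match arr with
  | [] => (0, 0, 0)
  | a :: _ => kadaneLoopB 0 0 0 a 0 0 0 arr

-- ===== PRECONDITION & SPEC =====
def Spec_kadane_with_position (arr : List Int) (out : Int × Int × Int) : Prop := out = kadane_with_position_alt arr
instance (arr : List Int) (out : Int × Int × Int) : Decidable (Spec_kadane_with_position arr out) := by unfold Spec_kadane_with_position; infer_instance

-- ===== CLAIM (what is proved, stated in full; the proofs are below) =====
def Claim_equal_kadane_with_position : Prop := ∀ (arr : List Int), Dom_kadane_with_position arr → Spec_kadane_with_position arr (kadane_with_position arr)

-- ===== LEMMAS AND PROOFS =====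

-- Joint invariant: A's (current_sum, current_left) equal B's (cum - min_prefix, min_index).
theorem kadaneLoop_eq (xs : List Int) : ∀ (ms ml mr cum mp mi i : Int),
    kadaneLoopA ms (cum - mp) ml mr mi i xs = kadaneLoopB cum mp mi ms ml mr i xs := by
  induction xs with
  | nil => intro ms ml mr cum mp mi i; rfl
  | cons x rest ih =>
    intro ms ml mr cum mp mi i
    simp only [kadaneLoopA, kadaneLoopB]
    by_cases h : cum < mp
    · have hA : x > (cum - mp) + x := by omega
      simp only [if_pos h, if_pos hA]
      rw [show cum + x - cum = x from by ring]
      split_ifs with hb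
      · have h2 := ih x i i (cum + x) cum i (i + 1)
        rw [show cum + x - cum = x from by ring] at h2; exact h2
      · have h2 := ih ms ml mr (cum + x) cum i (i + 1)
        rw [show cum + x - cum = x from by ring] at h2; exact h2
    · have hA : ¬ x > (cum - mp) + x := by omega
      simp only [if_neg h, if_neg hA]
      rw [show cum - mp + x = cum + x - mp from by ring]
      split_ifs with hb
      · exact ih (cum + x - mp) mi i (cum + x) mp mi (i + 1)
      · exact ih ms ml mr (cum + x) mp mi (i + 1)

-- ===== VERDICT (by name: the statement is the Claim_ definition above) =====
theorem kadane_with_position_spec : Claim_equal_kadane_with_position := by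
  intro arr _
  unfold Spec_kadane_with_position kadane_with_position kadane_with_position_alt
  match arr with
  | [] => rfl
  | a :: rest =>
    -- peel B's first iteration (i = 0): cum = 0 = mp, cand = a = bs, both ifs fail
    show kadaneLoopA a a 0 0 0 1 rest = kadaneLoopB 0 0 0 a 0 0 0 (a :: rest)
    simp only [kadaneLoopB]
    rw [if_neg (by omega : ¬ (0:Int) < 0), if_neg (by omega : ¬ (0:Int) + a - 0 > a)]
    have := kadaneLoop_eq rest a 0 0 (0 + a) 0 0 1
    simpa using this
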